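-- pv_equiv track=rewrite | github.com/BhupiSindhwani/python-problem-solving | misc/largest_substring_between_two_characters.py | largest_substring_between_two_characters
-- ===== SOURCE A (Python) =====
-- def largest_substring_between_two_characters(s: str) -> int:
--     """
--     Given a string s, return the length of the longest substring between two equal characters, excluding the two characters. If there is no such substring return -1.
--
--     A substring is a contiguous sequence of characters within a string.
--
--     Args:
--         s: input string
--
--     Returns:
--         the length of the longest substring between two equal characters
--     """
--     output = -1
--     char_map = {}
--
--     for idx, ch in enumerate(s):
--         if ch in char_map:
--             output = max(output, idx - char_map[ch] - 1)
--         else: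
--             char_map[ch] = idx
--
--     return output
-- ===== SOURCE B (Python) =====
-- def largest_substring_between_two_characters(s: str) -> int:
--     output = -1
--     n = len(s)
--     for j in range(n):
--         for i in range(j):
--             if s[i] == s[j]:
--                 output = max(output, j - i - 1)
--     return output
-- ===== Notes on version B (the rewrite author's own statement) =====
-- stated objective: alternative
-- what changed: Replaces A's single linear pass with a first-occurrence dictionary by a dictionary-free exhaustive double loop over all index pairs i<j, taking the max gap j-i-1 over every pair of equal characters.
import Mathlib
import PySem

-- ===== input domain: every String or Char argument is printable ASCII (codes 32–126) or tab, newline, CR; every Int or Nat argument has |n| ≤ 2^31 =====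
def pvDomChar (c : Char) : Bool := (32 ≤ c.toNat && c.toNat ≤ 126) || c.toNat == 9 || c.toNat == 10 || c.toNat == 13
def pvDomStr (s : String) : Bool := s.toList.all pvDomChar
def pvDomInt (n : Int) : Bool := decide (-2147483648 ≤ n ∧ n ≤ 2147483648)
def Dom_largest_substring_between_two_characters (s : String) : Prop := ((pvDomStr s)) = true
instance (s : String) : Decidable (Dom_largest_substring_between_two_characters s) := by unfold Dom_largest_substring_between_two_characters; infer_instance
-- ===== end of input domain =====

-- B replaces A's single linear pass with a first-occurrence dictionary by a dictionary-free
-- exhaustive double loop over all index pairs i<j, maximizing j-i-1 over equal-character pairs.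

-- ===== PORT A =====
-- loop body of A's pass: on a repeated character update the running max, else record first index
-- (Python's `char_map[ch]` is guarded by `ch in char_map`, so `getD _ 0` is exact here)
def stepA_lsb (st : Int × PySem.Dict Char Int) (p : Int × Char) : Int × PySem.Dict Char Int :=
  if st.2.contains p.2 then (max st.1 (p.1 - st.2.getD p.2 0 - 1), st.2)
  else (st.1, st.2.insert p.2 p.1)

def largest_substring_between_two_characters (s : String) : Int :=
  ((PySem.List.enumerate s.toList 0).foldl stepA_lsb (-1, PySem.Dict.empty)).1

-- ===== PORT B =====
-- body of B's inner loop `for i in range(j)`; since i < j < len(s), `getD _ ' '` is exact s[i]/s[j]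
def innerB_lsb (cs : List Char) (j : Nat) (out : Int) (i : Nat) : Int :=
  if cs.getD i ' ' = cs.getD j ' ' then max out ((j : Int) - (i : Int) - 1) else out

-- body of B's outer loop `for j in range(n)`
def outerB_lsb (cs : List Char) (out : Int) (j : Nat) : Int :=
  (List.range j).foldl (innerB_lsb cs j) out

def largest_substring_between_two_characters_alt (s : String) : Int :=
  (List.range s.toList.length).foldl (outerB_lsb s.toList) (-1)

-- ===== PRECONDITION & SPEC =====
def Spec_largest_substring_between_two_characters (s : String) (out : Int) : Prop := out = largest_substring_between_two_characters_alt s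
instance (s : String) (out : Int) : Decidable (Spec_largest_substring_between_two_characters s out) := by unfold Spec_largest_substring_between_two_characters; infer_instance

-- ===== CLAIM (what is proved, stated in full; the proofs are below) =====
def Claim_equal_largest_substring_between_two_characters : Prop := ∀ (s : String), Dom_largest_substring_between_two_characters s → Spec_largest_substring_between_two_characters s (largest_substring_between_two_characters s)

-- ===== LEMMAS AND PROOFS =====

-- B's inner loop at a fixed right endpoint, abstracted: scan positions 0..len-1 for x, max of M-i-1
def innerCore (cs : List Char) (x : Char) (M : Int) (b : Int) : Int :=
  (List.range cs.length).foldl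
    (fun out i => if cs.getD i ' ' = x then max out (M - (i : Int) - 1) else out) b

-- A's first-occurrence dictionary, as a standalone fold over the enumerated characters
def firstD_lsb (ps : List (Int × Char)) : PySem.Dict Char Int :=
  ps.foldl (fun d p => if d.contains p.2 then d else d.insert p.2 p.1) PySem.Dict.empty

-- B's whole computation on a plain character list
def bfold_lsb (cs : List Char) : Int :=
  (List.range cs.length).foldl (outerB_lsb cs) (-1)

-- the inner scan keeps only the gap to the FIRST occurrence: later ones are dominated
lemma innerCore_spec (cs : List Char) (x : Char) (M b : Int) :
    innerCore cs x M b =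
      match PySem.List.index? cs x with
      | some k => max b (M - (k : Int) - 1)
      | none => b := by
  induction cs generalizing M b with
  | nil => simp [innerCore, PySem.List.index?]
  | cons c cs ih =>
      have hfold : innerCore (c :: cs) x M b
          = innerCore cs x (M - 1) (if c = x then max b (M - 1) else b) := by
        unfold innerCore
        rw [List.length_cons, List.range_succ_eq_map, List.foldl_cons, List.foldl_map]
        have hb : (if (c :: cs).getD 0 ' ' = x then max b (M - (0:Nat) - 1) else b)
            = (if c = x then max b (M - 1) else b) := by norm_num
        rw [hb]
        congr 1
        funext out i
        have : ((c :: cs).getD (Nat.succ i) ' ') = cs.getD i ' ' := rfl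
        rw [this]
        have : M - ((Nat.succ i : Nat) : Int) - 1 = (M - 1) - (i : Int) - 1 := by push_cast; ring
        rw [this]
      rw [hfold, ih]
      by_cases hc : c = x
      · subst hc
        rw [PySem.List.index?_cons_self, if_pos rfl]
        cases hix : PySem.List.index? cs c with
        | none => simp
        | some k =>
            simp only []
            have h1 : M - 1 - (k : Int) - 1 ≤ max b (M - 1) := le_trans (by omega) (le_max_right b (M - 1))
            rw [max_eq_left h1]; norm_num
      · rw [PySem.List.index?_cons_of_ne _ hc, if_neg hc]
        cases hix : PySem.List.index? cs x with
        | none => simp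
        | some k => simp only [Option.map_some]; push_cast; ring_nf

lemma firstD_append_singleton (ps : List (Int × Char)) (p : Int × Char) :
    firstD_lsb (ps ++ [p]) =
      if (firstD_lsb ps).contains p.2 then firstD_lsb ps else (firstD_lsb ps).insert p.2 p.1 := by
  simp [firstD_lsb, List.foldl_append]

-- A's dictionary stores exactly the index of each character's first occurrence
lemma firstD_get? (cs : List Char) (c : Char) :
    (firstD_lsb (PySem.List.enumerate cs 0)).get? c
      = (PySem.List.index? cs c).map (fun k => (k : Int)) := by
  induction cs using List.reverseRecOn generalizing c with
  | nil => simp [firstD_lsb, PySem.List.enumerate_nil, PySem.Dict.get?_empty, PySem.List.index?]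
  | append_singleton cs y ih =>
      rw [PySem.List.enumerate_append]
      simp only [PySem.List.enumerate_cons, PySem.List.enumerate_nil, zero_add]
      rw [firstD_append_singleton]
      have hcont : (firstD_lsb (PySem.List.enumerate cs 0)).contains y
          = (PySem.List.index? cs y).isSome := by
        rw [PySem.Dict.contains_eq_isSome_get?, ih]
        cases PySem.List.index? cs y <;> rfl
      cases hiy : PySem.List.index? cs y with
      | some k =>
          have hmem : y ∈ cs := (PySem.List.index?_isSome_iff _ _).mp (by rw [hiy]; rfl)
          rw [hcont, hiy]
          simp only [Option.isSome_some, if_pos]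
          rw [ih]
          by_cases hcy : c = y
          · subst hcy; rw [PySem.List.index?_append_of_mem _ hmem]
          · by_cases hm : c ∈ cs
            · rw [PySem.List.index?_append_of_mem _ hm]
            · rw [(PySem.List.index?_eq_none_iff _ _).mpr hm,
                (PySem.List.index?_eq_none_iff _ _).mpr (by simp [hm, hcy])]
      | none =>
          rw [hcont, hiy]
          simp only [Option.isSome_none, Bool.false_eq_true, if_false]
          have hym : y ∉ cs := (PySem.List.index?_eq_none_iff _ _).mp hiy
          by_cases hcy : c = y
          · subst hcy
            rw [PySem.Dict.get?_insert_self, PySem.List.index?_append_singleton_self _ _ hym]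
            simp
          · rw [PySem.Dict.get?_insert_of_ne _ _ hcy, ih]
            by_cases hm : c ∈ cs
            · rw [PySem.List.index?_append_of_mem _ hm]
            · rw [(PySem.List.index?_eq_none_iff _ _).mpr hm,
                (PySem.List.index?_eq_none_iff _ _).mpr (by simp [hm, hcy])]

-- appending a character does not change B's inner-loop body at earlier endpoints
lemma innerB_stable (cs : List Char) (x : Char) (j i : Nat) (out : Int)
    (hi : i < cs.length) (hj : j < cs.length) :
    innerB_lsb (cs ++ [x]) j out i = innerB_lsb cs j out i := by
  unfold innerB_lsb
  rw [List.getD_append _ _ _ _ hi, List.getD_append _ _ _ _ hj]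

-- B's outer-loop body at the new last endpoint is the abstract inner scan for the new character
lemma outerB_at_len (cs : List Char) (x : Char) (out : Int) :
    outerB_lsb (cs ++ [x]) out cs.length = innerCore cs x (cs.length : Int) out := by
  unfold outerB_lsb innerCore
  apply PySem.List.foldl_congr_mem
  intro acc i hi
  have hi' : i < cs.length := List.mem_range.mp hi
  unfold innerB_lsb
  rw [List.getD_append _ _ _ _ hi']
  have : (cs ++ [x]).getD cs.length ' ' = x := by simp [List.getD_eq_getElem?_getD]
  rw [this]

-- B's double loop extends by one right endpoint when a character is appended
lemma bfold_append (cs : List Char) (x : Char) :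
    bfold_lsb (cs ++ [x]) = innerCore cs x (cs.length : Int) (bfold_lsb cs) := by
  unfold bfold_lsb
  rw [List.length_append, List.length_singleton, List.range_succ, List.foldl_append,
    List.foldl_cons, List.foldl_nil]
  have hpref : List.foldl (outerB_lsb (cs ++ [x])) (-1) (List.range cs.length)
      = List.foldl (outerB_lsb cs) (-1) (List.range cs.length) := by
    apply PySem.List.foldl_congr_mem
    intro acc j hj
    have hj' : j < cs.length := List.mem_range.mp hj
    unfold outerB_lsb
    exact PySem.List.foldl_congr_mem _ _ _ _
      (fun acc i hi => innerB_stable cs x j i acc (lt_trans (List.mem_range.mp hi) hj') hj')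
  rw [hpref, outerB_at_len]

-- main invariant: A's single dict-carrying pass computes B's double-loop result
lemma foldA_eq (cs : List Char) :
    (PySem.List.enumerate cs 0).foldl stepA_lsb (-1, PySem.Dict.empty)
      = (bfold_lsb cs, firstD_lsb (PySem.List.enumerate cs 0)) := by
  induction cs using List.reverseRecOn with
  | nil => rfl
  | append_singleton cs x ih =>
      rw [PySem.List.enumerate_append]
      simp only [PySem.List.enumerate_cons, PySem.List.enumerate_nil, zero_add]
      rw [List.foldl_append, ih, List.foldl_cons, List.foldl_nil, firstD_append_singleton]
      have hcont : (firstD_lsb (PySem.List.enumerate cs 0)).contains x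
          = (PySem.List.index? cs x).isSome := by
        rw [PySem.Dict.contains_eq_isSome_get?, firstD_get? cs x]
        cases PySem.List.index? cs x <;> rfl
      rw [bfold_append, innerCore_spec]
      cases hix : PySem.List.index? cs x with
      | some k =>
          have hc : (firstD_lsb (PySem.List.enumerate cs 0)).contains x = true := by
            rw [hcont, hix]; rfl
          have hg : (firstD_lsb (PySem.List.enumerate cs 0)).getD x 0 = (k : Int) := by
            apply PySem.Dict.getD_of_get?_eq_some
            rw [firstD_get? cs x, hix]; rfl
          simp only [stepA_lsb, hc, if_pos, hg]
      | none =>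
          have hc : (firstD_lsb (PySem.List.enumerate cs 0)).contains x = false := by
            rw [hcont, hix]; rfl
          simp [stepA_lsb, hc]

-- ===== VERDICT (by name: the statement is the Claim_ definition above) =====
theorem largest_substring_between_two_characters_spec : Claim_equal_largest_substring_between_two_characters := by
  intro s _
  unfold Spec_largest_substring_between_two_characters
  unfold largest_substring_between_two_characters largest_substring_between_two_characters_alt
  rw [foldA_eq]
  rfl
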